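-- pv_equiv track=rewrite | github.com/soumyajyoti2005/soumyajyoti2005 | .github/scripts/fetch_leetcode_badges.py | build_badge_table
-- ===== SOURCE A (Python) =====
-- def build_badge_table(badges):
--     if not badges:
--         return "_No badges earned yet — keep grinding! 💪_\n"
--
--     # Sort by creationDate descending (newest first)
--     sorted_badges = sorted(badges, key=lambda b: b.get("creationDate", ""), reverse=True)
--
--     rows = []
--     cells = []
--
--     for i, badge in enumerate(sorted_badges):
--         name = badge.get("displayName") or badge.get("name", "Badge")
--         icon = badge.get("icon", "")
--         date = badge.get("creationDate", "")
--
--         # Build icon URL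
--         if icon.startswith("http"):
--             icon_url = icon
--         else:
--             icon_url = f"https://leetcode.com{icon}"
--
--         cell = (
--             f'<td align="center" width="110">\n'
--             f'  <img src="{icon_url}" width="60" height="60" alt="{name}"/>\n'
--             f'  <br/>\n'
--             f'  <sub><b>{name}</b></sub>\n'
--             f'  <br/>\n'
--             f'  <sub>{date}</sub>\n'
--             f'</td>'
--         )
--         cells.append(cell)
--
--         # 5 badges per row
--         if (i + 1) % 5 == 0:
--             rows.append("<tr>\n" + "\n".join(cells) + "\n</tr>")
--             cells = []
--
--     if cells:
--         rows.append("<tr>\n" + "\n".join(cells) + "\n</tr>")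
--
--     table = (
--         '<table align="center">\n'
--         + "\n".join(rows)
--         + "\n</table>"
--     )
--     return table
-- ===== SOURCE B (Python) =====
-- def _badge_cell(badge):
--     name = badge.get("displayName") or badge.get("name", "Badge")
--     icon = badge.get("icon", "")
--     date = badge.get("creationDate", "")
--     icon_url = icon if icon.startswith("http") else f"https://leetcode.com{icon}"
--     return (
--         f'<td align="center" width="110">\n'
--         f'  <img src="{icon_url}" width="60" height="60" alt="{name}"/>\n'
--         f'  <br/>\n'
--         f'  <sub><b>{name}</b></sub>\n'
--         f'  <br/>\n'
--         f'  <sub>{date}</sub>\n'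
--         f'</td>'
--     )
--
--
-- def build_badge_table(badges):
--     if not badges:
--         return "_No badges earned yet — keep grinding! 💪_\n"
--
--     sorted_badges = sorted(badges, key=lambda b: b.get("creationDate", ""), reverse=True)
--
--     cells = [_badge_cell(b) for b in sorted_badges]
--
--     rows = []
--     while cells:
--         rows.append("<tr>\n" + "\n".join(cells[:5]) + "\n</tr>")
--         cells = cells[5:]
--
--     return '<table align="center">\n' + "\n".join(rows) + "\n</table>"
-- ===== Notes on version B (the rewrite author's own statement) =====
-- stated objective: simpler
-- what changed: B builds the full cell list in one pass and then chunks it into rows of five with a slice-based while loop (cells[:5] / cells[5:]), replacing A's enumerate loop with a modulo-5 counter, an in-loop buffer flush and a trailing flush.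
import Mathlib
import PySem

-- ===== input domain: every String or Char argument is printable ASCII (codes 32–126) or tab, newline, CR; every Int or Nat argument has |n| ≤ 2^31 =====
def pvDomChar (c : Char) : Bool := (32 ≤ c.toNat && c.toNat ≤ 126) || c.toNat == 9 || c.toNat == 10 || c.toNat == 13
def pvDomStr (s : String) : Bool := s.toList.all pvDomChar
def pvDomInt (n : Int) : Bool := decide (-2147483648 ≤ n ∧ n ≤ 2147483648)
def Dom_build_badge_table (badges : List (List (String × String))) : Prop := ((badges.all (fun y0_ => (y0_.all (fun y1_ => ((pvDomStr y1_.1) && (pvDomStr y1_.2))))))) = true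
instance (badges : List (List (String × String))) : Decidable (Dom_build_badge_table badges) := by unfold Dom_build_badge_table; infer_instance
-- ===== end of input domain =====

-- B replaces A's modulo-5 counter/buffer-flush loop by a one-pass cell list chunked into rows of
-- five with a slice-based while loop (simpler decomposition; same result).

-- ===== PORT A =====
def build_badge_table (badges : List (List (String × String))) : String :=
  if badges = [] then "_No badges earned yet — keep grinding! 💪_\n"
  else
    let sorted_badges := PySem.List.sorted badges
      (fun b => (PySem.Dict.ofList b).getD "creationDate" "") true
    let st := (PySem.List.enumerate sorted_badges 0).foldl
      (fun (st : List String × List String) ib =>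
        let i := ib.1
        let badge := PySem.Dict.ofList ib.2
        let name := match badge.get? "displayName" with
          | some s => if s ≠ "" then s else badge.getD "name" "Badge"
          | none => badge.getD "name" "Badge"
        let icon := badge.getD "icon" ""
        let date := badge.getD "creationDate" ""
        let icon_url := if PySem.Str.startswith icon "http" then icon
          else "https://leetcode.com" ++ icon
        let cell := "<td align=\"center\" width=\"110\">\n  <img src=\"" ++ icon_url
          ++ "\" width=\"60\" height=\"60\" alt=\"" ++ name ++ "\"/>\n  <br/>\n  <sub><b>"
          ++ name ++ "</b></sub>\n  <br/>\n  <sub>" ++ date ++ "</sub>\n</td>"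
        let cells := st.2 ++ [cell]
        if PySem.Int.mod (i + 1) 5 == 0 then
          (st.1 ++ ["<tr>\n" ++ PySem.Str.join "\n" cells ++ "\n</tr>"], ([] : List String))
        else (st.1, cells))
      (([] : List String), ([] : List String))
    let rows := if st.2 ≠ [] then
        st.1 ++ ["<tr>\n" ++ PySem.Str.join "\n" st.2 ++ "\n</tr>"]
      else st.1
    "<table align=\"center\">\n" ++ PySem.Str.join "\n" rows ++ "\n</table>"

-- ===== PORT B =====
-- B-side helper: one cell (same fallback/icon/date logic, as a function)
def badge_cell_alt (b : List (String × String)) : String :=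
  let badge := PySem.Dict.ofList b
  let name := match badge.get? "displayName" with
    | some s => if s ≠ "" then s else badge.getD "name" "Badge"
    | none => badge.getD "name" "Badge"
  let icon := badge.getD "icon" ""
  let date := badge.getD "creationDate" ""
  let icon_url := if PySem.Str.startswith icon "http" then icon
    else "https://leetcode.com" ++ icon
  "<td align=\"center\" width=\"110\">\n  <img src=\"" ++ icon_url
    ++ "\" width=\"60\" height=\"60\" alt=\"" ++ name ++ "\"/>\n  <br/>\n  <sub><b>"
    ++ name ++ "</b></sub>\n  <br/>\n  <sub>" ++ date ++ "</sub>\n</td>"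

-- B-side helper: the while loop 'while cells: rows.append(row(cells[:5])); cells = cells[5:]'
def rows_loop_alt (cells : List String) : List String :=
  if cells = [] then []
  else
    ("<tr>\n" ++ PySem.Str.join "\n" (PySem.List.slice cells none (some 5)) ++ "\n</tr>")
      :: rows_loop_alt (PySem.List.slice cells (some 5) none)
termination_by cells.length
decreasing_by
  rename_i h
  have h0 : 0 < cells.length := List.length_pos_iff.mpr h
  simp only [PySem.List.slice, PySem.List.clampIdx]
  split_ifs <;> simp <;> omega

def build_badge_table_alt (badges : List (List (String × String))) : String :=
  if badges = [] then "_No badges earned yet — keep grinding! 💪_\n"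
  else
    let sorted_badges := PySem.List.sorted badges
      (fun b => (PySem.Dict.ofList b).getD "creationDate" "") true
    let cells := sorted_badges.map badge_cell_alt
    let rows := rows_loop_alt cells
    "<table align=\"center\">\n" ++ PySem.Str.join "\n" rows ++ "\n</table>"

-- ===== PRECONDITION & SPEC =====
def Spec_build_badge_table (badges : List (List (String × String))) (out : String) : Prop := out = build_badge_table_alt badges
instance (badges : List (List (String × String))) (out : String) : Decidable (Spec_build_badge_table badges out) := by unfold Spec_build_badge_table; infer_instance

-- ===== CLAIM (what is proved, stated in full; the proofs are below) =====
def Claim_equal_build_badge_table : Prop := ∀ (badges : List (List (String × String))), Dom_build_badge_table badges → Spec_build_badge_table badges (build_badge_table badges)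

-- ===== LEMMAS AND PROOFS =====

-- A's fold step, on the already-built cell
def pvStepA (st : List String × List String) (ic : Int × String) : List String × List String :=
  let cells := st.2 ++ [ic.2]
  if PySem.Int.mod (ic.1 + 1) 5 == 0 then
    (st.1 ++ ["<tr>\n" ++ PySem.Str.join "\n" cells ++ "\n</tr>"], ([] : List String))
  else (st.1, cells)

def pvRow (cs : List String) : String := "<tr>\n" ++ PySem.Str.join "\n" cs ++ "\n</tr>"

lemma pvFoldMap {α : Type} (f : α → String)
    (g : List String × List String → Int × String → List String × List String)
    (xs : List α) (i : Int) (st : List String × List String) :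
    (PySem.List.enumerate xs i).foldl (fun st ib => g st (ib.1, f ib.2)) st
      = (PySem.List.enumerate (xs.map f) i).foldl g st := by
  induction xs generalizing i st with
  | nil => simp [PySem.List.enumerate_nil]
  | cons x t ih => simp [PySem.List.enumerate_cons, ih]

lemma pvRowsLoop_cons5 (buf t : List String) (h : buf.length = 5) :
    rows_loop_alt (buf ++ t) = pvRow buf :: rows_loop_alt t := by
  have hne : buf ++ t ≠ [] := by
    intro hc; have := congrArg List.length hc; simp [h] at this
  have hS1 : PySem.List.slice (buf ++ t) none (some 5) = buf := by
    rw [PySem.List.slice_to (b := 5)]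
    · rw [show Int.toNat 5 = 5 from rfl, ← h]
      simp
    · norm_num
  have hS2 : PySem.List.slice (buf ++ t) (some 5) none = t := by
    rw [PySem.List.slice_from (a := 5)]
    · rw [show Int.toNat 5 = 5 from rfl, ← h]
      simp
    · norm_num
  rw [rows_loop_alt.eq_def]
  simp [hne, hS1, hS2, pvRow]

lemma pvRowsLoop_small (buf : List String) (h : buf.length < 5) (hne : buf ≠ []) :
    rows_loop_alt buf = [pvRow buf] := by
  have hS1 : PySem.List.slice buf none (some 5) = buf := by
    rw [PySem.List.slice_to (b := 5)]
    · rw [show Int.toNat 5 = 5 from rfl]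
      exact List.take_of_length_le (by omega)
    · norm_num
  have hS2 : PySem.List.slice buf (some 5) none = [] := by
    rw [PySem.List.slice_from (a := 5)]
    · rw [show Int.toNat 5 = 5 from rfl]
      exact List.drop_eq_nil_of_le (by omega)
    · norm_num
  rw [rows_loop_alt.eq_def]
  simp [hne, hS1, hS2, pvRow]
  rw [rows_loop_alt.eq_def]
  simp

lemma pvKey (cs : List String) (n : Nat) (rows buf : List String)
    (hb : buf.length = n % 5) :
    (let st := (PySem.List.enumerate cs (n : Int)).foldl pvStepA (rows, buf)
     if st.2 ≠ [] then st.1 ++ [pvRow st.2] else st.1)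
      = rows ++ rows_loop_alt (buf ++ cs) := by
  induction cs generalizing n rows buf with
  | nil =>
    simp only [PySem.List.enumerate_nil, List.foldl_nil, List.append_nil]
    by_cases hbe : buf = []
    · subst hbe
      rw [rows_loop_alt.eq_def]
      simp
    · have hlt : buf.length < 5 := by omega
      simp [hbe, pvRowsLoop_small buf hlt hbe]
  | cons c t ih =>
    rw [PySem.List.enumerate_cons, List.foldl_cons]
    by_cases h4 : n % 5 = 4
    · have hstep : pvStepA (rows, buf) ((n : Int), c)
          = (rows ++ [pvRow (buf ++ [c])], ([] : List String)) := by
        simp [pvStepA, pvRow]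
        omega
      rw [hstep]
      have hstart : (n : Int) + 1 = ((n + 1 : Nat) : Int) := by push_cast; ring
      rw [hstart, ih (n + 1) _ _ (by simp; omega)]
      have hlen : (buf ++ [c]).length = 5 := by simp [hb, h4]
      have : buf ++ c :: t = (buf ++ [c]) ++ t := by simp
      rw [this, pvRowsLoop_cons5 _ _ hlen]
      simp
    · have hstep : pvStepA (rows, buf) ((n : Int), c) = (rows, buf ++ [c]) := by
        simp [pvStepA]
        omega
      rw [hstep]
      have hstart : (n : Int) + 1 = ((n + 1 : Nat) : Int) := by push_cast; ring
      rw [hstart, ih (n + 1) _ _ (by simp [hb]; omega)]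
      simp

-- ===== VERDICT (by name: the statement is the Claim_ definition above) =====
theorem build_badge_table_spec : Claim_equal_build_badge_table := by
  intro badges _
  unfold Spec_build_badge_table build_badge_table build_badge_table_alt
  by_cases hbe : badges = []
  · simp [hbe]
  · simp only [hbe, if_false]
    set srt := PySem.List.sorted badges
      (fun b => (PySem.Dict.ofList b).getD "creationDate" "") true with hsrt
    have hfold :
        (PySem.List.enumerate srt 0).foldl
          (fun (st : List String × List String) ib =>
            let i := ib.1
            let badge := PySem.Dict.ofList ib.2
            let name := match badge.get? "displayName" with
              | some s => if s ≠ "" then s else badge.getD "name" "Badge"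
              | none => badge.getD "name" "Badge"
            let icon := badge.getD "icon" ""
            let date := badge.getD "creationDate" ""
            let icon_url := if PySem.Str.startswith icon "http" then icon
              else "https://leetcode.com" ++ icon
            let cell := "<td align=\"center\" width=\"110\">\n  <img src=\"" ++ icon_url
              ++ "\" width=\"60\" height=\"60\" alt=\"" ++ name ++ "\"/>\n  <br/>\n  <sub><b>"
              ++ name ++ "</b></sub>\n  <br/>\n  <sub>" ++ date ++ "</sub>\n</td>"
            let cells := st.2 ++ [cell]
            if PySem.Int.mod (i + 1) 5 == 0 then
              (st.1 ++ ["<tr>\n" ++ PySem.Str.join "\n" cells ++ "\n</tr>"], ([] : List String))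
            else (st.1, cells))
          (([] : List String), ([] : List String))
        = (PySem.List.enumerate (srt.map badge_cell_alt) 0).foldl pvStepA ([], []) := by
      rw [← pvFoldMap badge_cell_alt pvStepA srt 0 ([], [])]
      rfl
    rw [hfold]
    have hk := pvKey (srt.map badge_cell_alt) 0 [] [] (by simp)
    simp only [Nat.cast_zero, List.nil_append, pvRow] at hk
    rw [hk]
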